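-- pv_equiv track=rewrite | github.com/wennroy/Leetcode | 数学/667优美的排列II.py | constructArray
-- ===== SOURCE A (Python) =====
-- from typing import List
--
-- def constructArray(n: int, k: int) -> List[int]:
--     ans = []
--     l, r = 1, n
--     is_left = True
--     while k > 1:
--         if is_left:
--             ans.append(l)
--             l += 1
--             is_left = False
--         else:
--             ans.append(r)
--             r -= 1
--             is_left = True
--         k -= 1
--
--     if is_left:
--         for i in range(l, r + 1):
--             ans.append(i)
--     else:
--         for i in range(r, l - 1, -1):
--             ans.append(i)
--
--     return ans
-- ===== SOURCE B (Python) =====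
-- def constructArray(n, k):
--     half = k - 1 if k > 1 else 0
--     nlow = (half + 1) // 2
--     nhigh = half // 2
--     lows = list(range(1, 1 + nlow))
--     highs = list(range(n, n - nhigh, -1))
--     prefix = [x for p in zip(lows, highs) for x in p] + lows[nhigh:]
--     if half % 2 == 0:
--         tail = list(range(1 + nlow, n - nhigh + 1))
--     else:
--         tail = list(range(n - nhigh, nlow, -1))
--     return prefix + tail
-- ===== Notes on version B (the rewrite author's own statement) =====
-- stated objective: alternative
-- what changed: Replaces A's single stateful alternating-pointer while-loop by a closed-form count split (nlow/nhigh from k-1), building the two monotone runs as ranges and merging them by zip-and-flatten plus the leftover low, then one range for the tail.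
import Mathlib
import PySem

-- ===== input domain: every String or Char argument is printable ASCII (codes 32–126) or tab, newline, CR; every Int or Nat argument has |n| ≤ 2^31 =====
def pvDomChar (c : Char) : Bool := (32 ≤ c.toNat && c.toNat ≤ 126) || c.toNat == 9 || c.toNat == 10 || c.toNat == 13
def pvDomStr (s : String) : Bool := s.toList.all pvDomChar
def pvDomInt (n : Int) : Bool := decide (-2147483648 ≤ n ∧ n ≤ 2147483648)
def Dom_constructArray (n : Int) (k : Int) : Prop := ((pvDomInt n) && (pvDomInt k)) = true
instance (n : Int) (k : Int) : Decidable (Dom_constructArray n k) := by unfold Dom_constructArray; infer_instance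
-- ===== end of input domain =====

-- B replaces A's stateful alternating-pointer loop by a closed-form count split: two
-- monotone ranges merged by zip-and-flatten plus the leftover low, then one range tail
-- (objective: alternative decomposition, same cost).

-- ===== PORT A =====
-- the while-loop of A: fuel = number of remaining iterations (k-1 when k>1);
-- returns (appended elements, final l, final r, final is_left)
def pvALoop : Nat → Int → Int → Bool → List Int × Int × Int × Bool
  | 0, l, r, il => ([], l, r, il)
  | m+1, l, r, il =>
    if il then
      let p := pvALoop m (l+1) r false
      (l :: p.1, p.2)
    else
      let p := pvALoop m l (r-1) true
      (r :: p.1, p.2)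

def constructArray (n : Int) (k : Int) : List Int :=
  let p := pvALoop (k-1).toNat 1 n true
  let l := p.2.1
  let r := p.2.2.1
  let il := p.2.2.2
  p.1 ++ (if il then PySem.List.pyRange l (r+1) 1 else PySem.List.pyRange r (l-1) (-1))

-- ===== PORT B =====
def constructArray_alt (n : Int) (k : Int) : List Int :=
  let half : Int := if 1 < k then k - 1 else 0
  let nlow := PySem.Int.floordiv (half + 1) 2
  let nhigh := PySem.Int.floordiv half 2
  let lows := PySem.List.pyRange 1 (1 + nlow) 1
  let highs := PySem.List.pyRange n (n - nhigh) (-1)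
  let pre := (lows.zip highs).flatMap (fun p => [p.1, p.2]) ++ PySem.List.slice lows (some nhigh) none
  let tail := if PySem.Int.mod half 2 = 0 then PySem.List.pyRange (1 + nlow) (n - nhigh + 1) 1
              else PySem.List.pyRange (n - nhigh) nlow (-1)
  pre ++ tail

-- ===== PRECONDITION & SPEC =====
def Spec_constructArray (n : Int) (k : Int) (out : List Int) : Prop := out = constructArray_alt n k
instance (n : Int) (k : Int) (out : List Int) : Decidable (Spec_constructArray n k out) := by unfold Spec_constructArray; infer_instance

-- ===== CLAIM (what is proved, stated in full; the proofs are below) =====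
def Claim_equal_constructArray : Prop := ∀ (n : Int) (k : Int), Dom_constructArray n k → Spec_constructArray n k (constructArray n k)

-- ===== LEMMAS AND PROOFS =====

-- the sequence of values A's loop appends, as a function of fuel/state
def pvMix : Nat → Int → Int → Bool → List Int
  | 0, _, _, _ => []
  | m+1, l, r, true => l :: pvMix m (l+1) r false
  | m+1, l, r, false => r :: pvMix m l (r-1) true

theorem pvALoop_eq (m : Nat) : ∀ (l r : Int) (il : Bool),
    pvALoop m l r il =
      (pvMix m l r il,
       l + (if il then (((m+1)/2 : Nat) : Int) else ((m/2 : Nat) : Int)),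
       r - (if il then ((m/2 : Nat) : Int) else (((m+1)/2 : Nat) : Int)),
       if m % 2 = 0 then il else !il) := by
  induction m with
  | zero => intro l r il; cases il <;> simp [pvALoop, pvMix]
  | succ m ih =>
    intro l r il
    cases il with
    | true =>
      simp only [pvALoop, pvMix, if_pos, ih (l+1) r false, Bool.false_eq_true, if_false,
        Bool.not_false, Bool.not_true, Prod.mk.injEq]
      refine ⟨trivial, by omega, trivial, ?_⟩
      rcases Nat.mod_two_eq_zero_or_one m with h | h
      · have h' : (m+1) % 2 = 1 := by omega
        simp [h, h']
      · have h' : (m+1) % 2 = 0 := by omega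
        simp [h, h']
    | false =>
      simp only [pvALoop, pvMix, ih l (r-1) true, Bool.false_eq_true, if_false, if_true,
        Bool.not_false, Bool.not_true, Prod.mk.injEq]
      refine ⟨trivial, trivial, by omega, ?_⟩
      rcases Nat.mod_two_eq_zero_or_one m with h | h
      · have h' : (m+1) % 2 = 1 := by omega
        simp [h, h']
      · have h' : (m+1) % 2 = 0 := by omega
        simp [h, h']

theorem pvMix_even (t : Nat) : ∀ l r : Int,
    pvMix (2*t) l r true =
      ((PySem.List.pyRange l (l + (t:Int)) 1).zip (PySem.List.pyRange r (r - (t:Int)) (-1))).flatMap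
        (fun p => [p.1, p.2]) := by
  induction t with
  | zero => intro l r; simp [pvMix, PySem.List.pyRange_one_eq_nil]
  | succ t ih =>
    intro l r
    have h2 : 2*(t+1) = (2*t)+1+1 := by omega
    rw [h2, show (((t:Nat)+1 : Nat):Int) = (t:Int)+1 by push_cast; ring]
    show l :: r :: pvMix (2*t) (l+1) (r-1) true = _
    rw [ih (l+1) (r-1)]
    conv_rhs => rw [PySem.List.pyRange_one_cons (by omega),
                    PySem.List.pyRange_neg_one_cons (by omega)]
    simp only [List.zip_cons_cons, List.flatMap_cons]
    rw [show l + ((t:Int)+1) = (l+1) + (t:Int) by ring,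
        show r - ((t:Int)+1) = (r-1) - (t:Int) by ring]
    simp

theorem pvMix_odd (t : Nat) : ∀ l r : Int,
    pvMix (2*t+1) l r true = pvMix (2*t) l r true ++ [l + (t:Int)] := by
  induction t with
  | zero => intro l r; simp [pvMix]
  | succ t ih =>
    intro l r
    have h2 : 2*(t+1)+1 = (2*t+1)+1+1 := by omega
    have h3 : 2*(t+1) = (2*t)+1+1 := by omega
    rw [h2, h3]
    show l :: r :: pvMix (2*t+1) (l+1) (r-1) true = (l :: r :: pvMix (2*t) (l+1) (r-1) true) ++ _
    rw [ih (l+1) (r-1)]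
    push_cast
    simp only [List.cons_append]
    ring_nf

theorem pvZip_snoc {α β : Type} (xs : List α) (x : α) (ys : List β) (h : ys.length ≤ xs.length) :
    (xs ++ [x]).zip ys = xs.zip ys := by
  induction xs generalizing ys with
  | nil => cases ys with
    | nil => simp
    | cons y ys => simp at h
  | cons a xs ih => cases ys with
    | nil => simp
    | cons y ys => simp only [List.cons_append, List.zip_cons_cons]; rw [ih ys (by simpa using h)]

-- ===== VERDICT (by name: the statement is the Claim_ definition above) =====
theorem constructArray_spec : Claim_equal_constructArray := by
  intro n k _
  unfold Spec_constructArray constructArray constructArray_alt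
  obtain ⟨m, hm⟩ : ∃ m : Nat, (k-1).toNat = m := ⟨_, rfl⟩
  have hhalf : (if 1 < k then k - 1 else 0) = (m : Int) := by
    split_ifs with h <;> omega
  have hnlow : PySem.Int.floordiv ((m:Int) + 1) 2 = (((m+1)/2 : Nat) : Int) := by
    rw [PySem.Int.floordiv_eq_ediv_of_pos (by omega)]; omega
  have hnhigh : PySem.Int.floordiv (m:Int) 2 = ((m/2 : Nat) : Int) := by
    rw [PySem.Int.floordiv_eq_ediv_of_pos (by omega)]; omega
  have hmod : PySem.Int.mod (m:Int) 2 = ((m % 2 : Nat) : Int) := by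
    rw [PySem.Int.mod_eq_emod_of_pos (by omega)]; omega
  simp only [hm, hhalf, hnlow, hnhigh, hmod, pvALoop_eq, if_true]
  rcases Nat.mod_two_eq_zero_or_one m with hp | hp
  · -- m even
    obtain ⟨t, rfl⟩ : ∃ t, m = 2*t := ⟨m/2, by omega⟩
    have e1 : (2*t+1)/2 = t := by omega
    have e2 : (2*t)/2 = t := by omega
    simp only [e1, e2, hp, Nat.cast_zero, Bool.not_true, if_pos]
    norm_num
    rw [pvMix_even t 1 n]
    have hlen : (PySem.List.pyRange 1 (1 + (t:Int)) 1).length = t := by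
      rw [PySem.List.length_pyRange_one]; omega
    rw [List.drop_of_length_le (le_of_eq hlen), List.nil_append]
  · -- m odd
    obtain ⟨t, rfl⟩ : ∃ t, m = 2*t+1 := ⟨m/2, by omega⟩
    have e1 : (2*t+1+1)/2 = t+1 := by omega
    have e2 : (2*t+1)/2 = t := by omega
    simp only [e1, e2, hp, Nat.cast_one, Bool.not_true]
    norm_num
    rw [pvMix_odd t 1 n]
    have hsnoc : PySem.List.pyRange 1 (1 + ((t:Int)+1)) 1
        = PySem.List.pyRange 1 (1 + (t:Int)) 1 ++ [1 + (t:Int)] := by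
      have h := PySem.List.pyRange_one_succ_right (a := (1:Int)) (b := 1 + (t:Int)) (by omega)
      rw [show (1 + ((t:Int)+1)) = (1 + (t:Int)) + 1 by ring, h]
    have hlen : (PySem.List.pyRange 1 (1 + (t:Int)) 1).length = t := by
      rw [PySem.List.length_pyRange_one]; omega
    have hlenhi : (PySem.List.pyRange n (n - (t:Int)) (-1)).length = t := by
      rw [PySem.List.length_pyRange_neg_one]; omega
    rw [hsnoc, pvZip_snoc _ _ _ (by rw [hlen, hlenhi]),
        List.drop_left' hlen, pvMix_even t 1 n, List.append_assoc]
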